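-- pv_equiv track=rewrite | github.com/MuchYouth/juliet-playground | experiments/epic001b_function_inventory/scripts/categorize_function_names.py | skip_qualifiers
-- ===== SOURCE A (Python) =====
-- QUALIFIERS = {"const", "noexcept", "override", "final", "volatile"}
--
-- def skip_qualifiers(text: str, idx: int) -> int:
--     i = idx
--     n = len(text)
--     while i < n:
--         while i < n and text[i].isspace():
--             i += 1
--         progressed = False
--         for q in QUALIFIERS:
--             if text.startswith(q, i):
--                 j = i + len(q)
--                 if j == n or not (text[j].isalnum() or text[j] == "_"):
--                     i = j
--                     progressed = True
--                     break
--         if not progressed: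
--             break
--     return i
-- ===== SOURCE B (Python) =====
-- QUALIFIERS = {"const", "noexcept", "override", "final", "volatile"}
--
--
-- def _token_len(s):
--     t = 0
--     for c in s:
--         if not (c.isalnum() or c == "_"):
--             break
--         t += 1
--     return t
--
--
-- def skip_qualifiers(text: str, idx: int) -> int:
--     rest = text[idx:]
--     done = 0
--     while True:
--         stripped = rest.lstrip()
--         ws = len(rest) - len(stripped)
--         t = _token_len(stripped)
--         if stripped[:t] not in QUALIFIERS:
--             return idx + done + ws
--         done += ws + t
--         rest = stripped[t:]
-- ===== Notes on version B (the rewrite author's own statement) =====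
-- stated objective: alternative
-- what changed: B slices off the suffix text[idx:] and consumes it as a shrinking string with a consumed-count accumulator (lstrip for whitespace, a character for-loop for the maximal identifier-token length, one set-membership test), instead of A's index arithmetic with a per-qualifier startswith-plus-boundary probe.
-- outside the precondition, e.g. on skip_qualifiers('const', -5): A returns -5, B returns 0; on skip_qualifiers('const', -9): A raises IndexError, B returns -4
import Mathlib
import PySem

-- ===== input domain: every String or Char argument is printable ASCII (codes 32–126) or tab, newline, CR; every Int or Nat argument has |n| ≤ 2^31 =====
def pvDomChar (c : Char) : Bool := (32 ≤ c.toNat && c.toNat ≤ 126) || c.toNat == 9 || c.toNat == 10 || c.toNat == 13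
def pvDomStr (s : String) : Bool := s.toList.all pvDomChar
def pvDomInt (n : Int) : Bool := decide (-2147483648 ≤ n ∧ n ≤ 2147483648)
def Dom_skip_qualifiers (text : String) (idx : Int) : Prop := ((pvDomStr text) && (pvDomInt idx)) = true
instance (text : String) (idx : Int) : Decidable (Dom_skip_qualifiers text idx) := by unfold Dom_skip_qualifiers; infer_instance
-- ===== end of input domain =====

-- B works on the suffix text[idx:] as a shrinking string with a consumed-count accumulator
-- (lstrip, a character for-loop for the token length, set membership) instead of A's
-- index arithmetic with a per-qualifier startswith probe (objective: alternative, same cost).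

-- ===== PORT A =====
-- QUALIFIERS (a set of strings; iteration order is irrelevant: no qualifier is a prefix of another)
def pvQualsA : List (List Char) :=
  ["const".toList, "noexcept".toList, "override".toList, "final".toList, "volatile".toList]

-- text[j].isalnum() or text[j] == "_"
def pvIsIdentA (c : Char) : Bool := PySem.Chars.isalnum c || c == '_'

-- inner `while i < n and text[i].isspace(): i += 1`
def pvSkipWsA (cs : List Char) (i : Nat) : Nat :=
  if h : i < cs.length then
    if PySem.Chars.isspace cs[i] then pvSkipWsA cs (i + 1) else i
  else i
termination_by cs.length - i

-- `for q in QUALIFIERS: if text.startswith(q, i): j = i + len(q); if j == n or not ident(text[j]): …`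
def pvTryQualsA (cs : List Char) (i : Nat) : List (List Char) → Option Nat
  | [] => none
  | q :: rest =>
    if q.isPrefixOf (cs.drop i) then
      let j := i + q.length
      if h : j < cs.length then
        if pvIsIdentA cs[j] then pvTryQualsA cs i rest else some j
      else some j
    else pvTryQualsA cs i rest

-- outer `while i < n: … if not progressed: break`
def pvLoopA (cs : List Char) (i : Nat) : Nat :=
  if _h : i < cs.length then
    let i' := pvSkipWsA cs i
    match pvTryQualsA cs i' pvQualsA with
    | some j => if _h2 : i < j then pvLoopA cs j else j  -- i < j always holds in Python (totality guard)
    | none => i'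
  else i
termination_by cs.length - i
decreasing_by exact Nat.sub_lt_sub_left _h _h2

def skip_qualifiers (text : String) (idx : Int) : Int :=
  -- negative idx (Python wraparound indexing) lies outside Pre_; the port only claims 0 ≤ idx
  if 0 ≤ idx then (pvLoopA text.toList idx.toNat : Int) else idx

-- ===== PORT B =====
def pvQualsB : List (List Char) :=
  ["const".toList, "noexcept".toList, "override".toList, "final".toList, "volatile".toList]

def pvIsIdentB (c : Char) : Bool := PySem.Chars.isalnum c || c == '_'

-- `for c in s: if not (c.isalnum() or c == "_"): break; t += 1`
def pvTokLenB : List Char → Nat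
  | [] => 0
  | c :: rest => if pvIsIdentB c then pvTokLenB rest + 1 else 0

-- the `while True` loop of B over the pair (rest, done)
def pvLoopB (idx : Int) (rest : List Char) (done : Nat) : Int :=
  let stripped := rest.dropWhile PySem.Chars.isspace          -- rest.lstrip()
  let ws := rest.length - stripped.length
  let t := pvTokLenB stripped
  if h : stripped.take t ∈ pvQualsB                            -- stripped[:t] in QUALIFIERS
  then pvLoopB idx (stripped.drop t) (done + ws + t)
  else idx + (done : Int) + (ws : Int)
termination_by rest.length
decreasing_by
  have h' : (rest.dropWhile PySem.Chars.isspace).take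
      (pvTokLenB (rest.dropWhile PySem.Chars.isspace)) ∈ pvQualsB := h
  have h1 : (rest.dropWhile PySem.Chars.isspace).length ≤ rest.length :=
    List.length_dropWhile_le _ _
  have h2 : rest.dropWhile PySem.Chars.isspace ≠ [] := by
    intro he; rw [he] at h'; revert h'; decide
  have h3 : pvTokLenB (rest.dropWhile PySem.Chars.isspace) ≠ 0 := by
    intro he; rw [he] at h'; revert h'; simp; decide
  have h4 : 0 < (rest.dropWhile PySem.Chars.isspace).length := List.length_pos_iff.mpr h2
  simp only [List.length_drop]
  omega

def skip_qualifiers_alt (text : String) (idx : Int) : Int :=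
  pvLoopB idx (PySem.List.slice text.toList (some idx) none) 0    -- rest = text[idx:]

-- ===== PRECONDITION & SPEC =====
-- Pre_ excludes negative idx: there A either raises IndexError (idx < -len(text)) or mixes Python's
-- negative-index wraparound with startswith's clamping — an accidental corner no caller would specify.
def Pre_skip_qualifiers (text : String) (idx : Int) : Prop := 0 ≤ idx
instance (text : String) (idx : Int) : Decidable (Pre_skip_qualifiers text idx) := by
  unfold Pre_skip_qualifiers; infer_instance

def pvWitness_skip_qualifiers : String × Int := ("const volatile x", 0)

def Spec_skip_qualifiers (text : String) (idx : Int) (out : Int) : Prop := out = skip_qualifiers_alt text idx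
instance (text : String) (idx : Int) (out : Int) : Decidable (Spec_skip_qualifiers text idx out) := by
  unfold Spec_skip_qualifiers; infer_instance

-- ===== CLAIM (what is proved, stated in full; the proofs are below) =====
def Claim_equal_skip_qualifiers : Prop := ∀ (text : String) (idx : Int), Dom_skip_qualifiers text idx → Pre_skip_qualifiers text idx → Spec_skip_qualifiers text idx (skip_qualifiers text idx)

-- ===== LEMMAS AND PROOFS =====

theorem pvSkipWsA_le (cs : List Char) (i : Nat) : i ≤ pvSkipWsA cs i := by
  unfold pvSkipWsA
  split
  · split
    · have := pvSkipWsA_le cs (i + 1); omega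
    · exact le_refl i
  · exact le_refl i
termination_by cs.length - i

theorem pvSkipWsA_eq (cs : List Char) (i : Nat) :
    pvSkipWsA cs i = i + ((cs.drop i).takeWhile PySem.Chars.isspace).length := by
  unfold pvSkipWsA
  split
  · rename_i h
    split
    · rename_i hsp
      rw [pvSkipWsA_eq cs (i + 1), List.drop_eq_getElem_cons h, List.takeWhile_cons, if_pos hsp]
      simp only [List.length_cons]
      omega
    · rename_i hsp
      rw [List.drop_eq_getElem_cons h, List.takeWhile_cons, if_neg hsp]
      simp
  · rename_i h
    rw [List.drop_eq_nil_of_le (by omega)]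
    simp
termination_by cs.length - i

theorem pvDropWhile_eq_drop {α : Type} (p : α → Bool) (l : List α) :
    l.dropWhile p = l.drop (l.takeWhile p).length := by
  induction l with
  | nil => rfl
  | cons c l ih =>
    rw [List.dropWhile_cons, List.takeWhile_cons]
    split_ifs with hc
    · simpa using ih
    · simp

theorem pvTokLenB_eq (s : List Char) : pvTokLenB s = (s.takeWhile pvIsIdentB).length := by
  induction s with
  | nil => rfl
  | cons c s ih =>
    rw [pvTokLenB, List.takeWhile_cons]
    split_ifs with hc
    · simp [ih]
    · simp

theorem pvTakeTokLen {α : Type} (p : α → Bool) (s : List α) :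
    s.take (s.takeWhile p).length = s.takeWhile p :=
  (List.prefix_iff_eq_take.mp (List.takeWhile_prefix _)).symm

-- per-qualifier characterisation: A's startswith+boundary test succeeds iff the maximal
-- identifier token starting at i is exactly q
theorem pvMatch_iff (cs : List Char) (i : Nat) (q : List Char)
    (hid : q.all pvIsIdentA) :
    (q.isPrefixOf (cs.drop i) = true ∧
      (∀ h : i + q.length < cs.length, pvIsIdentA cs[i + q.length] = false))
    ↔ (cs.drop i).takeWhile pvIsIdentA = q := by
  constructor
  · rintro ⟨hpre, hbd⟩
    rw [List.isPrefixOf_iff_prefix] at hpre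
    obtain ⟨r, hr⟩ := hpre
    have hrdrop : r = cs.drop (i + q.length) := by
      have h2 := congrArg (List.drop q.length) hr
      rw [List.drop_append_of_le_length (le_refl _), List.drop_length, List.nil_append,
        List.drop_drop] at h2
      exact h2
    have hall : ∀ a ∈ q, pvIsIdentA a := fun a ha => List.all_eq_true.mp hid a ha
    rw [← hr, List.takeWhile_append, List.takeWhile_eq_self_iff.mpr hall, if_pos rfl]
    suffices hsuf : List.takeWhile pvIsIdentA r = [] by rw [hsuf, List.append_nil]
    by_cases h : i + q.length < cs.length
    · rw [hrdrop, List.drop_eq_getElem_cons h, List.takeWhile_cons, if_neg (by simp [hbd h])]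
    · rw [hrdrop, List.drop_eq_nil_of_le (by omega)]
      simp
  · intro htw
    have hpre : q <+: cs.drop i := htw ▸ List.takeWhile_prefix _
    refine ⟨List.isPrefixOf_iff_prefix.mpr hpre, ?_⟩
    intro h
    have hsplit : (cs.drop i).dropWhile pvIsIdentA = cs[i + q.length] :: cs.drop (i + q.length + 1) := by
      have h1 : (cs.drop i).takeWhile pvIsIdentA ++ (cs.drop i).dropWhile pvIsIdentA = cs.drop i :=
        List.takeWhile_append_dropWhile
      have h2 := congrArg (List.drop q.length) h1
      rw [htw, List.drop_append_of_le_length (le_refl _), List.drop_length, List.nil_append,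
        List.drop_drop] at h2
      rw [h2]; exact List.drop_eq_getElem_cons h
    have hlen : 0 < ((cs.drop i).dropWhile pvIsIdentA).length := by rw [hsplit]; exact Nat.succ_pos _
    have hnot := List.dropWhile_get_zero_not (p := pvIsIdentA) (cs.drop i) hlen
    simp only [List.get_eq_getElem, hsplit, List.getElem_cons_zero] at hnot
    simpa using hnot

-- list-level characterisation of A's qualifier loop
theorem pvTryQualsA_eq (cs : List Char) (i : Nat) (Q : List (List Char))
    (hQ : ∀ q ∈ Q, q ≠ [] ∧ q.all pvIsIdentA) :
    pvTryQualsA cs i Q =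
      if (cs.drop i).takeWhile pvIsIdentA ∈ Q
      then some (i + ((cs.drop i).takeWhile pvIsIdentA).length) else none := by
  induction Q with
  | nil => simp [pvTryQualsA]
  | cons q rest ih =>
    have hq := hQ q (by simp)
    have ihr := ih (fun q' h' => hQ q' (List.mem_cons_of_mem _ h'))
    by_cases heq : (cs.drop i).takeWhile pvIsIdentA = q
    · have hm := (pvMatch_iff cs i q hq.2).mpr heq
      simp only [pvTryQualsA, hm.1, if_true]
      rw [if_pos (show (cs.drop i).takeWhile pvIsIdentA ∈ q :: rest by simp [heq]), heq]
      split_ifs with h1 h2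
      · exact absurd (hm.2 h1) (by simp [h2])
      · rfl
      · rfl
    · simp only [pvTryQualsA]
      by_cases hp : q.isPrefixOf (cs.drop i) = true
      · simp only [hp, if_true, List.mem_cons, heq, false_or]
        rw [← ihr]
        split_ifs with h1 h2
        · rfl
        · exact absurd ((pvMatch_iff cs i q hq.2).mp
            ⟨hp, fun _ => by simp at h2; exact h2⟩) heq
        · exact absurd ((pvMatch_iff cs i q hq.2).mp
            ⟨hp, fun hh => absurd hh h1⟩) heq
      · simp only [hp]
        rw [if_neg (by simpa using hp), ihr]
        simp [List.mem_cons, heq]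

-- B's loop on the suffix cs.drop i, with consumed count added to idx, equals A's final index
theorem pvLoopB_nil (idx : Int) (d : Nat) : pvLoopB idx [] d = idx + (d : Int) := by
  rw [pvLoopB]
  simp
  intro hx
  exact absurd hx (by decide)

theorem pvLoopA_step (cs : List Char) (i : Nat) (hi : i < cs.length) :
    pvLoopA cs i = (match pvTryQualsA cs (pvSkipWsA cs i) pvQualsA with
      | some j => if _h2 : i < j then pvLoopA cs j else j
      | none => pvSkipWsA cs i) := by
  rw [pvLoopA, dif_pos hi]

theorem pvLoopA_some (cs : List Char) (i j : Nat) (hi : i < cs.length)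
    (hq : pvTryQualsA cs (pvSkipWsA cs i) pvQualsA = some j) :
    pvLoopA cs i = if _h2 : i < j then pvLoopA cs j else j := by
  rw [pvLoopA_step cs i hi, hq]

theorem pvLoopA_none (cs : List Char) (i : Nat) (hi : i < cs.length)
    (hq : pvTryQualsA cs (pvSkipWsA cs i) pvQualsA = none) :
    pvLoopA cs i = pvSkipWsA cs i := by
  rw [pvLoopA_step cs i hi, hq]

theorem pvLoopAB_aux : ∀ (k : Nat) (cs : List Char) (i d : Nat) (idx : Int),
    cs.length ≤ i + k → pvLoopB idx (cs.drop i) d = idx + d + (pvLoopA cs i : Int) - i := by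
  intro k
  induction k with
  | zero =>
    intro cs i d idx hk
    have hi : ¬ i < cs.length := by omega
    have hnil : cs.drop i = [] := List.drop_eq_nil_of_le (by omega)
    rw [hnil, pvLoopB_nil, pvLoopA, dif_neg hi]
    ring
  | succ k ihk =>
    intro cs i d idx hk
    by_cases hi : i < cs.length
    · have hBA : pvIsIdentB = pvIsIdentA := rfl
      have hQBA : pvQualsB = pvQualsA := rfl
      set tw := ((cs.drop i).takeWhile PySem.Chars.isspace).length with htw
      have htwle : tw ≤ cs.length - i := by
        have hh := (List.takeWhile_prefix (l := cs.drop i) PySem.Chars.isspace).length_le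
        simp only [List.length_drop] at hh
        omega
      have hstripped : (cs.drop i).dropWhile PySem.Chars.isspace = cs.drop (i + tw) := by
        rw [htw, pvDropWhile_eq_drop, List.drop_drop, Nat.add_comm]
      have hws : (List.drop i cs).length - (cs.drop (i + tw)).length = tw := by
        simp only [List.length_drop]
        omega
      have hq := pvTryQualsA_eq cs (pvSkipWsA cs i) pvQualsA (by decide)
      rw [pvSkipWsA_eq cs i, ← htw] at hq
      rw [pvLoopB]
      simp only [hstripped, pvTokLenB_eq, pvTakeTokLen, hBA, hQBA, hws]
      by_cases hmem : (cs.drop (i + tw)).takeWhile pvIsIdentA ∈ pvQualsA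
      · rw [if_pos hmem] at hq
        have hne : (cs.drop (i + tw)).takeWhile pvIsIdentA ≠ [] := by
          have hq0 : ∀ q ∈ pvQualsA, q ≠ [] := by decide
          exact hq0 _ hmem
        have htpos : 0 < ((cs.drop (i + tw)).takeWhile pvIsIdentA).length :=
          List.length_pos_iff.mpr hne
        set t := ((cs.drop (i + tw)).takeWhile pvIsIdentA).length with ht
        have hij : i < i + tw + t := by omega
        rw [pvLoopA_some cs i (i + tw + t) hi (by rw [pvSkipWsA_eq cs i, ← htw]; exact hq),
          dif_pos hij, dif_pos hmem, List.drop_drop]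
        rw [ihk cs (i + tw + t) (d + tw + t) idx (by omega)]
        push_cast
        ring
      · rw [if_neg hmem] at hq
        rw [pvLoopA_none cs i hi (by rw [pvSkipWsA_eq cs i, ← htw]; exact hq),
          pvSkipWsA_eq cs i, ← htw, dif_neg hmem]
        push_cast
        ring
    · have hnil : cs.drop i = [] := List.drop_eq_nil_of_le (by omega)
      rw [hnil, pvLoopB_nil, pvLoopA, dif_neg hi]
      ring

theorem pvLoopAB (cs : List Char) (i d : Nat) (idx : Int) :
    pvLoopB idx (cs.drop i) d = idx + d + (pvLoopA cs i : Int) - i :=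
  pvLoopAB_aux cs.length cs i d idx (by omega)

-- ===== VERDICT (by name: the statement is the Claim_ definition above) =====
theorem skip_qualifiers_spec : Claim_equal_skip_qualifiers := by
  intro text idx _hdom hpre
  unfold Pre_skip_qualifiers at hpre
  unfold Spec_skip_qualifiers skip_qualifiers skip_qualifiers_alt
  rw [if_pos hpre, PySem.List.slice_from text.toList hpre]
  have h := pvLoopAB text.toList idx.toNat 0 idx
  rw [h]
  have ht : ((idx.toNat : Nat) : Int) = idx := Int.toNat_of_nonneg hpre
  omega
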